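-- pv_equiv track=rewrite | github.com/Dwinovo/ACF-Stego | core/tools/analysis_tools.py | build_realistic_protocol_table_rows
-- ===== SOURCE A (Python) =====
-- import math
-- from typing import Any, Iterable
--
-- REALISTIC_STEGO_GROUPS = ("G2", "G3", "G4", "G5", "G6", "G7")
--
-- _ANY_ACF_K = object()
--
-- def safe_float(value: Any) -> float | None:
--     try:
--         number = float(value)
--     except (TypeError, ValueError):
--         return None
--     if math.isnan(number) or math.isinf(number):
--         return None
--     return number
--
-- def normalize_acf_k(value: Any) -> int | None:
--     number = safe_float(value)
--     if number is None:
--         return None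
--     rounded = int(round(number))
--     return rounded if rounded > 0 else None
--
-- def select_summary_row(
--     summaries: list[dict[str, Any]],
--     *,
--     experiment: str,
--     group: str,
--     condition: str,
--     acf_k: int | None | object = _ANY_ACF_K,
-- ) -> dict[str, Any] | None:
--     for row in summaries:
--         if (
--             str(row.get("experiment", "")) == experiment
--             and str(row.get("group", "")) == group
--             and str(row.get("condition", "")) == condition
--             and (
--                 acf_k is _ANY_ACF_K
--                 or normalize_acf_k(row.get("acf_k")) == normalize_acf_k(acf_k)
--             )
--         ):
--             return row
--     return None
--
-- def metric_value(row: dict[str, Any] | None, metric: str, *, precision: int = 4) -> str: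
--     if row is None:
--         return "-"
--     formatted = row.get(metric)
--     if formatted is None:
--         return "-"
--     return str(formatted)
--
-- def build_realistic_protocol_table_rows(summaries: list[dict[str, Any]]) -> list[list[str]]:
--     experiment = "realistic_cognitive_asymmetry"
--     rows: list[list[str]] = []
--     for group in REALISTIC_STEGO_GROUPS:
--         row = select_summary_row(summaries, experiment=experiment, group=group, condition="no_drift")
--         rows.append(
--             [
--                 group,
--                 metric_value(row, "ber"),
--                 metric_value(row, "decode_success"),
--                 metric_value(row, "embedding_capacity"),
--             ]
--         )
--     return rows
-- ===== SOURCE B (Python) =====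
-- REALISTIC_STEGO_GROUPS = ("G2", "G3", "G4", "G5", "G6", "G7")
--
--
-- def metric_value(row, metric, *, precision: int = 4) -> str:
--     if row is None:
--         return "-"
--     formatted = row.get(metric)
--     if formatted is None:
--         return "-"
--     return str(formatted)
--
--
-- def build_realistic_protocol_table_rows(summaries):
--     # one pass: first matching row per group, then one lookup per fixed group
--     first = {}
--     for row in summaries:
--         if (
--             str(row.get("experiment", "")) == "realistic_cognitive_asymmetry"
--             and str(row.get("condition", "")) == "no_drift"
--         ):
--             g = str(row.get("group", ""))
--             if g not in first:
--                 first[g] = row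
--     return [
--         [
--             group,
--             metric_value(first.get(group), "ber"),
--             metric_value(first.get(group), "decode_success"),
--             metric_value(first.get(group), "embedding_capacity"),
--         ]
--         for group in REALISTIC_STEGO_GROUPS
--     ]
-- ===== Notes on version B (the rewrite author's own statement) =====
-- stated objective: alternative
-- what changed: One pass over summaries builds a dict of the first matching row per group, replacing A's six per-group rescans (one select_summary_row call per fixed group) with one lookup per group.
import Mathlib
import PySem

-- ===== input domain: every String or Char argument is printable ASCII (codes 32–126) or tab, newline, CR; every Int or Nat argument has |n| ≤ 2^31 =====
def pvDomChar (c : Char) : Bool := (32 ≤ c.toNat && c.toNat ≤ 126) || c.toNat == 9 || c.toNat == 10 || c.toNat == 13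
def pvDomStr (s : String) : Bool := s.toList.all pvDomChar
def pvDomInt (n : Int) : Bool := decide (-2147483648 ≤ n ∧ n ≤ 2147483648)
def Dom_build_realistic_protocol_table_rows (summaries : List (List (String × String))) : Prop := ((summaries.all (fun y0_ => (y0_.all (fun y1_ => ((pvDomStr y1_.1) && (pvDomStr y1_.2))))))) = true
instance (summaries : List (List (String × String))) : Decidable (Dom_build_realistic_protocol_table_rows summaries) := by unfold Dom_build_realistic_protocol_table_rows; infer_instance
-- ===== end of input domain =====

-- B restructures A: instead of one scan of `summaries` per fixed group, a single pass
-- records the first matching row per group, then each group is a dictionary lookup.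

-- ===== PORT A =====
-- row.get(k, "") / row.get(k): first match in the association list (dict lookup)
def pvRowGetD (row : List (String × String)) (k dflt : String) : String :=
  match row with
  | [] => dflt
  | (a, b) :: rest => if a = k then b else pvRowGetD rest k dflt

def pvRowGet? (row : List (String × String)) (k : String) : Option String :=
  match row with
  | [] => none
  | (a, b) :: rest => if a = k then some b else pvRowGet? rest k

-- select_summary_row with acf_k left at _ANY_ACF_K (as A calls it): first row matching the
-- three string tests (the acf_k disjunct is `acf_k is _ANY_ACF_K`, true here)
def select_summary_row (summaries : List (List (String × String)))
    (experiment group condition : String) : Option (List (String × String)) :=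
  match summaries with
  | [] => none
  | row :: rest =>
    if pvRowGetD row "experiment" "" = experiment ∧ pvRowGetD row "group" "" = group ∧
        pvRowGetD row "condition" "" = condition then
      some row
    else
      select_summary_row rest experiment group condition

-- metric_value: "-" for a missing row or metric, else the stored string
def metric_value (row : Option (List (String × String))) (metric : String) : String :=
  match row with
  | none => "-"
  | some r =>
    match pvRowGet? r metric with
    | none => "-"
    | some v => v

def pvRealisticStegoGroups : List String := ["G2", "G3", "G4", "G5", "G6", "G7"]

def build_realistic_protocol_table_rows (summaries : List (List (String × String))) : List (List String) :=
  pvRealisticStegoGroups.foldl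
    (fun rows group =>
      let row := select_summary_row summaries "realistic_cognitive_asymmetry" group "no_drift"
      rows ++ [[group, metric_value row "ber", metric_value row "decode_success",
                metric_value row "embedding_capacity"]])
    []

-- ===== PORT B =====
-- `g not in first` / `first[g] = row` on a plain dict: first-match lookup, append on miss
def pvFirstGet? (d : List (String × List (String × String))) (k : String) :
    Option (List (String × String)) :=
  match d with
  | [] => none
  | (a, r) :: rest => if a = k then some r else pvFirstGet? rest k

def pvCollectFirst (summaries : List (List (String × String))) :
    List (String × List (String × String)) :=
  summaries.foldl
    (fun first row =>
      if pvRowGetD row "experiment" "" = "realistic_cognitive_asymmetry" ∧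
          pvRowGetD row "condition" "" = "no_drift" then
        let g := pvRowGetD row "group" ""
        if (pvFirstGet? first g).isNone then first ++ [(g, row)] else first
      else first)
    []

def build_realistic_protocol_table_rows_alt (summaries : List (List (String × String))) : List (List String) :=
  let first := pvCollectFirst summaries
  pvRealisticStegoGroups.map
    (fun group =>
      [group, metric_value (pvFirstGet? first group) "ber",
       metric_value (pvFirstGet? first group) "decode_success",
       metric_value (pvFirstGet? first group) "embedding_capacity"])

-- ===== PRECONDITION & SPEC =====
def Spec_build_realistic_protocol_table_rows (summaries : List (List (String × String))) (out : List (List String)) : Prop := out = build_realistic_protocol_table_rows_alt summaries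
instance (summaries : List (List (String × String))) (out : List (List String)) : Decidable (Spec_build_realistic_protocol_table_rows summaries out) := by unfold Spec_build_realistic_protocol_table_rows; infer_instance

-- ===== CLAIM (what is proved, stated in full; the proofs are below) =====
def Claim_equal_build_realistic_protocol_table_rows : Prop := ∀ (summaries : List (List (String × String))), Dom_build_realistic_protocol_table_rows summaries → Spec_build_realistic_protocol_table_rows summaries (build_realistic_protocol_table_rows summaries)

-- ===== LEMMAS AND PROOFS =====

-- the one-pass dictionary looks up to exactly A's linear scan, for any accumulator
theorem pvFirstGet?_foldl (summaries : List (List (String × String)))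
    (acc : List (String × List (String × String))) (g : String) :
    pvFirstGet?
      (summaries.foldl
        (fun first row =>
          if pvRowGetD row "experiment" "" = "realistic_cognitive_asymmetry" ∧
              pvRowGetD row "condition" "" = "no_drift" then
            let gg := pvRowGetD row "group" ""
            if (pvFirstGet? first gg).isNone then first ++ [(gg, row)] else first
          else first)
        acc) g =
    (pvFirstGet? acc g).or
      (select_summary_row summaries "realistic_cognitive_asymmetry" g "no_drift") := by
  induction summaries generalizing acc with
  | nil => simp [select_summary_row]
  | cons row rest ih =>
    simp only [List.foldl_cons, select_summary_row]
    by_cases hec : pvRowGetD row "experiment" "" = "realistic_cognitive_asymmetry" ∧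
        pvRowGetD row "condition" "" = "no_drift"
    · simp only [hec, if_pos, and_true, true_and]
      by_cases hg : pvRowGetD row "group" "" = g
      · -- the row keys under g itself
        by_cases habs : (pvFirstGet? acc (pvRowGetD row "group" "")).isNone
        · rw [if_pos habs, ih]
          have hnone : pvFirstGet? acc g = none := by
            rw [← hg]; exact Option.isNone_iff_eq_none.mp habs
          have happ : ∀ (l : List (String × List (String × String))) r,
              pvFirstGet? l g = none → pvFirstGet? (l ++ [(g, r)]) g = some r := by
            intro l r hl
            induction l with
            | nil => simp [pvFirstGet?]
            | cons p tl ihl =>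
              obtain ⟨a, r'⟩ := p
              simp only [pvFirstGet?, List.cons_append] at hl ⊢
              by_cases hae : a = g
              · rw [if_pos hae] at hl; exact absurd hl (by simp)
              · rw [if_neg hae] at hl ⊢; exact ihl hl
          rw [hg, happ _ _ hnone, hnone]
          simp
        · rw [if_neg habs, ih]
          have hsome : ∃ r, pvFirstGet? acc g = some r := by
            rw [← hg]
            cases h : pvFirstGet? acc (pvRowGetD row "group" "") with
            | none => simp [h] at habs
            | some r => exact ⟨r, rfl⟩
          obtain ⟨r, hr⟩ := hsome
          simp [hr]
      · -- row stored (or not) under a different group: lookup of g unaffected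
        have hga : pvRowGetD row "group" "" ≠ g := hg
        have hkeep : ∀ (l : List (String × List (String × String))) r,
            pvFirstGet? (l ++ [(pvRowGetD row "group" "", r)]) g = pvFirstGet? l g := by
          intro l r
          induction l with
          | nil => simp [pvFirstGet?, hga]
          | cons p tl ihl => simp only [pvFirstGet?, List.cons_append]; split <;> simp [ihl]
        by_cases habs : (pvFirstGet? acc (pvRowGetD row "group" "")).isNone
        · rw [if_pos habs, ih, hkeep]
          simp [hg]
        · rw [if_neg habs, ih]
          simp [hg]
    · rw [if_neg hec, ih]
      have : ¬ (pvRowGetD row "experiment" "" = "realistic_cognitive_asymmetry" ∧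
          pvRowGetD row "group" "" = g ∧ pvRowGetD row "condition" "" = "no_drift") := by
        tauto
      rw [if_neg this]

theorem pvLookup_eq_select (summaries : List (List (String × String))) (g : String) :
    pvFirstGet? (pvCollectFirst summaries) g =
      select_summary_row summaries "realistic_cognitive_asymmetry" g "no_drift" := by
  unfold pvCollectFirst
  rw [pvFirstGet?_foldl]
  simp [pvFirstGet?]

-- ===== VERDICT (by name: the statement is the Claim_ definition above) =====
theorem build_realistic_protocol_table_rows_spec : Claim_equal_build_realistic_protocol_table_rows := by
  intro summaries _
  unfold Spec_build_realistic_protocol_table_rows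
  unfold build_realistic_protocol_table_rows build_realistic_protocol_table_rows_alt
  simp only [pvRealisticStegoGroups, List.foldl_cons, List.foldl_nil, List.map_cons,
    List.map_nil, List.nil_append, List.cons_append, pvLookup_eq_select]
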